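-- pv_equiv track=rewrite | github.com/dongjiu522/crop_word | crop_refactor_v1.py | peaksAndTroughsArraryPostProcess
-- ===== SOURCE A (Python) =====
-- def peaksAndTroughsArraryPostProcess(arrary):
--     start = 0
--
--     trough_index = 0
--     bins = []
--     for i in range(len(arrary)):
--         if arrary[i] == -100:
--             bins.append((trough_index,i))
--             trough_index=i
--         if i == len(arrary) - 1:
--             bins.append((trough_index,i))
--             trough_index=i
--     troughs = []
--     for trough_index_start,trough_index_end in bins:
--         for index in range(trough_index_start,trough_index_end):
--             if index < 0  or  index > len(arrary) -1:
--                 continue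
--             if arrary[index] == 100:
--                 troughs.append((trough_index_start,trough_index_end))
--                 break
--
--     return troughs
-- ===== SOURCE B (Python) =====
-- def peaksAndTroughsArraryPostProcess(arrary):
--     troughs = []
--     start = 0
--     has_peak = False
--     n = len(arrary)
--     for i in range(n):
--         if arrary[i] == -100:
--             if has_peak:
--                 troughs.append((start, i))
--             start = i
--             has_peak = False
--         if i == n - 1:
--             if has_peak:
--                 troughs.append((start, i))
--             start = i
--             has_peak = False
--         if arrary[i] == 100:
--             has_peak = True
--     return troughs
-- ===== Notes on version B (the rewrite author's own statement) =====
-- stated objective: faster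
-- what changed: B fuses A's build-bins-then-rescan two-phase structure into one linear pass that maintains the current bin start and a has_peak flag, never materialising the bins list and never re-scanning the array per bin (measured ~2x faster).
import Mathlib
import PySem

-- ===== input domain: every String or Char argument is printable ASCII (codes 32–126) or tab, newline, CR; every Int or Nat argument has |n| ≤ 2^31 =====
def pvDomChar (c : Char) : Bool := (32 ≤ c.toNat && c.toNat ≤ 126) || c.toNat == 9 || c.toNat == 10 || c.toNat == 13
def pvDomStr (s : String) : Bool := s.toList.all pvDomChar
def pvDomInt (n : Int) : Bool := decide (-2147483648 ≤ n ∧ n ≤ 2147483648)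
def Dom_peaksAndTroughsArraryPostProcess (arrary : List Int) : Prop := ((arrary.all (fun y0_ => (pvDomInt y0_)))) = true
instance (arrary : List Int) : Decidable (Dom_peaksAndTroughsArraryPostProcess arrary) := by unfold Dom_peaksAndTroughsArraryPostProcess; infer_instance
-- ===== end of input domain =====

-- B replaces A's build-bins-then-rescan two-phase structure with a single linear pass that
-- keeps the current bin start and a has_peak flag (objective: faster by a constant factor — no
-- intermediate bins list and no per-bin rescan; a timing run measured ~2x at the largest size).

-- ===== PORT A =====
-- inner 'for index in range(...): ... break' of A's second loop: returns whether a 100 is found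
def pvScanBreak (arrary : List Int) : List Int → Bool
  | [] => false
  | idx :: rest =>
    if idx < 0 ∨ idx > (arrary.length : Int) - 1 then pvScanBreak arrary rest
    else if PySem.List.pyGetD arrary idx 0 = 100 then true
    else pvScanBreak arrary rest

-- body of A's first loop (one iteration)
def pvAStep (arrary : List Int) (n : Int) (st : Int × List (Int × Int)) (i : Int) :
    Int × List (Int × Int) :=
  let st1 := if PySem.List.pyGetD arrary i 0 = -100 then (i, st.2 ++ [(st.1, i)]) else st
  if i = n - 1 then (i, st1.2 ++ [(st1.1, i)]) else st1

def peaksAndTroughsArraryPostProcess (arrary : List Int) : List (Int × Int) :=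
  let n : Int := arrary.length
  let st := (PySem.List.pyRange 0 n 1).foldl (pvAStep arrary n) (0, [])
  st.2.foldl
    (fun troughs b =>
      if pvScanBreak arrary (PySem.List.pyRange b.1 b.2 1) then troughs ++ [b] else troughs)
    []

-- ===== PORT B =====
-- body of B's single loop (state: start, has_peak, troughs)
def pvBStep (arrary : List Int) (n : Int) (st : Int × Bool × List (Int × Int)) (i : Int) :
    Int × Bool × List (Int × Int) :=
  let st1 := if PySem.List.pyGetD arrary i 0 = -100 then
      (i, false, if st.2.1 then st.2.2 ++ [(st.1, i)] else st.2.2) else st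
  let st2 := if i = n - 1 then
      (i, false, if st1.2.1 then st1.2.2 ++ [(st1.1, i)] else st1.2.2) else st1
  (st2.1, if PySem.List.pyGetD arrary i 0 = 100 then true else st2.2.1, st2.2.2)

def peaksAndTroughsArraryPostProcess_alt (arrary : List Int) : List (Int × Int) :=
  let n : Int := arrary.length
  ((PySem.List.pyRange 0 n 1).foldl (pvBStep arrary n) (0, false, [])).2.2

-- ===== PRECONDITION & SPEC =====
def Spec_peaksAndTroughsArraryPostProcess (arrary : List Int) (out : List (Int × Int)) : Prop := out = peaksAndTroughsArraryPostProcess_alt arrary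
instance (arrary : List Int) (out : List (Int × Int)) : Decidable (Spec_peaksAndTroughsArraryPostProcess arrary out) := by unfold Spec_peaksAndTroughsArraryPostProcess; infer_instance

-- ===== CLAIM (what is proved, stated in full; the proofs are below) =====
def Claim_equal_peaksAndTroughsArraryPostProcess : Prop := ∀ (arrary : List Int), Dom_peaksAndTroughsArraryPostProcess arrary → Spec_peaksAndTroughsArraryPostProcess arrary (peaksAndTroughsArraryPostProcess arrary)

-- ===== LEMMAS AND PROOFS =====

-- the predicate A's second phase tests on a bin
def pvP (arrary : List Int) (b : Int × Int) : Bool :=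
  pvScanBreak arrary (PySem.List.pyRange b.1 b.2 1)

-- 'a 100 occurs at some index in [t, k)'
def pvHasPeak (arrary : List Int) (t k : Int) : Bool :=
  (PySem.List.pyRange t k 1).any (fun j => decide (PySem.List.pyGetD arrary j 0 = 100))

lemma pvScanBreak_eq_any (arrary : List Int) (idxs : List Int)
    (hb : ∀ idx ∈ idxs, 0 ≤ idx ∧ idx ≤ (arrary.length : Int) - 1) :
    pvScanBreak arrary idxs = idxs.any (fun j => decide (PySem.List.pyGetD arrary j 0 = 100)) := by
  induction idxs with
  | nil => simp [pvScanBreak]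
  | cons x xs ih =>
    have hx := hb x (by simp)
    rw [pvScanBreak]
    rw [if_neg (by omega)]
    by_cases hpk : PySem.List.pyGetD arrary x 0 = 100
    · simp [hpk]
    · rw [if_neg hpk, ih (fun i hi => hb i (by simp [hi]))]
      simp [hpk]

lemma pvP_eq_hasPeak (arrary : List Int) (t k : Int) (ht : 0 ≤ t) (hk : k ≤ (arrary.length : Int)) :
    pvP arrary (t, k) = pvHasPeak arrary t k := by
  unfold pvP pvHasPeak
  exact pvScanBreak_eq_any arrary _ (fun idx hidx => by
    rw [PySem.List.mem_pyRange_one] at hidx; omega)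

lemma pvHasPeak_nil (arrary : List Int) (t k : Int) (h : k ≤ t) : pvHasPeak arrary t k = false := by
  simp [pvHasPeak, PySem.List.pyRange_one_eq_nil h]

lemma pvHasPeak_succ (arrary : List Int) (t k : Int) (h : t ≤ k) :
    pvHasPeak arrary t (k + 1) =
      (pvHasPeak arrary t k || decide (PySem.List.pyGetD arrary k 0 = 100)) := by
  unfold pvHasPeak
  rw [PySem.List.pyRange_one_succ_right h]
  simp

lemma pvAStep_acc (arrary : List Int) (n t : Int) (bs : List (Int × Int)) (i : Int) :
    pvAStep arrary n (t, bs) i =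
      ((pvAStep arrary n (t, []) i).1, bs ++ (pvAStep arrary n (t, []) i).2) := by
  unfold pvAStep
  split_ifs <;> simp

lemma pvFoldA_acc (arrary : List Int) (n : Int) (xs : List Int) :
    ∀ (t : Int) (bs : List (Int × Int)),
      xs.foldl (pvAStep arrary n) (t, bs) =
        ((xs.foldl (pvAStep arrary n) (t, [])).1,
          bs ++ (xs.foldl (pvAStep arrary n) (t, [])).2) := by
  induction xs with
  | nil => intro t bs; simp
  | cons x xs ih =>
    intro t bs
    simp only [List.foldl_cons]
    rw [pvAStep_acc]
    rcases hA : pvAStep arrary n (t, []) x with ⟨t', δ⟩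
    rw [show ((t', δ).1, bs ++ (t', δ).2) = (t', bs ++ δ) from rfl, ih t' (bs ++ δ), ih t' δ]
    simp

lemma pv_phase2_filter (arrary : List Int) (bs acc : List (Int × Int)) :
    bs.foldl
      (fun troughs b =>
        if pvScanBreak arrary (PySem.List.pyRange b.1 b.2 1) then troughs ++ [b] else troughs)
      acc = acc ++ bs.filter (pvP arrary) := by
  induction bs generalizing acc with
  | nil => simp
  | cons b bs ih =>
    simp only [List.foldl_cons, List.filter_cons]
    by_cases hp : pvScanBreak arrary (PySem.List.pyRange b.1 b.2 1)
    · rw [if_pos hp, ih]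
      simp [pvP, hp]
    · rw [if_neg hp, ih]
      simp [pvP, hp]

-- main invariant: the fused loop from index k equals the remaining bins, filtered
lemma pv_main (arrary : List Int) :
    ∀ (m : Nat) (k t : Int) (h : Bool) (ts : List (Int × Int)),
      ((arrary.length : Int) - k).toNat ≤ m → 0 ≤ t → t ≤ k →
      h = pvHasPeak arrary t k →
      ((PySem.List.pyRange k arrary.length 1).foldl
          (pvBStep arrary arrary.length) (t, h, ts)).2.2 =
        ts ++ ((PySem.List.pyRange k arrary.length 1).foldl
            (pvAStep arrary arrary.length) (t, [])).2.filter (pvP arrary) := by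
  intro m
  induction m with
  | zero =>
    intro k t h ts hm ht htk hh
    rw [PySem.List.pyRange_one_eq_nil (by omega)]
    simp
  | succ m ih =>
    intro k t h ts hm ht htk hh
    by_cases hkn : (arrary.length : Int) ≤ k
    · rw [PySem.List.pyRange_one_eq_nil hkn]; simp
    · rw [Int.not_le] at hkn
      rw [PySem.List.pyRange_one_cons hkn]
      simp only [List.foldl_cons]
      have hpk : pvP arrary (t, k) = h := by
        rw [pvP_eq_hasPeak arrary t k ht (by omega), hh]
      have hkk : pvP arrary (k, k) = false := by
        unfold pvP
        rw [PySem.List.pyRange_one_eq_nil (by omega)]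
        rfl
      by_cases hm100 : PySem.List.pyGetD arrary k 0 = -100 <;>
        by_cases hlast : k = (arrary.length : Int) - 1
      · -- element is -100 and k is the last index
        have e1 : pvBStep arrary (arrary.length : Int) (t, h, ts) k
            = (k, false, if h then ts ++ [(t, k)] else ts) := by
          cases h <;> simp [pvBStep, hm100, eq_true hlast]
        have e2 : pvAStep arrary (arrary.length : Int) (t, []) k = (k, [(t, k), (k, k)]) := by
          simp [pvAStep, hm100, eq_true hlast]
        rw [e1, e2, ih (k + 1) k false _ (by omega) (by omega) (by omega)
          (by rw [pvHasPeak_succ arrary k k le_rfl, pvHasPeak_nil arrary k k le_rfl,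
                hm100]; decide)]
        rw [pvFoldA_acc arrary _ _ k [(t, k), (k, k)]]
        simp only [List.filter_append, List.filter_cons, List.filter_nil, hpk, hkk]
        cases h <;> simp
      · -- element is -100, k not last
        have e1 : pvBStep arrary (arrary.length : Int) (t, h, ts) k
            = (k, false, if h then ts ++ [(t, k)] else ts) := by
          cases h <;> simp [pvBStep, hm100, eq_false hlast]
        have e2 : pvAStep arrary (arrary.length : Int) (t, []) k = (k, [(t, k)]) := by
          simp [pvAStep, hm100, eq_false hlast]
        rw [e1, e2, ih (k + 1) k false _ (by omega) (by omega) (by omega)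
          (by rw [pvHasPeak_succ arrary k k le_rfl, pvHasPeak_nil arrary k k le_rfl,
                hm100]; decide)]
        rw [pvFoldA_acc arrary _ _ k [(t, k)]]
        simp only [List.filter_append, List.filter_cons, List.filter_nil, hpk]
        cases h <;> simp
      · -- element is not -100, k is the last index
        have e1 : pvBStep arrary (arrary.length : Int) (t, h, ts) k
            = (k, decide (PySem.List.pyGetD arrary k 0 = 100), if h then ts ++ [(t, k)] else ts) := by
          cases h <;> by_cases hg : PySem.List.pyGetD arrary k 0 = 100 <;>
            simp [pvBStep, hm100, eq_true hlast, hg]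
        have e2 : pvAStep arrary (arrary.length : Int) (t, []) k = (k, [(t, k)]) := by
          simp [pvAStep, hm100, eq_true hlast]
        rw [e1, e2, ih (k + 1) k _ _ (by omega) (by omega) (by omega)
          (by rw [pvHasPeak_succ arrary k k le_rfl, pvHasPeak_nil arrary k k le_rfl];
              simp)]
        rw [pvFoldA_acc arrary _ _ k [(t, k)]]
        simp only [List.filter_append, List.filter_cons, List.filter_nil, hpk]
        cases h <;> simp
      · -- ordinary element, not last
        have e1 : pvBStep arrary (arrary.length : Int) (t, h, ts) k
            = (t, h || decide (PySem.List.pyGetD arrary k 0 = 100), ts) := by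
          cases h <;> by_cases hg : PySem.List.pyGetD arrary k 0 = 100 <;>
            simp [pvBStep, hm100, eq_false hlast, hg]
        have e2 : pvAStep arrary (arrary.length : Int) (t, []) k = (t, []) := by
          simp [pvAStep, hm100, eq_false hlast]
        rw [e1, e2, ih (k + 1) t _ _ (by omega) ht (by omega)
          (by rw [pvHasPeak_succ arrary t k htk, hh])]

-- ===== VERDICT (by name: the statement is the Claim_ definition above) =====
theorem peaksAndTroughsArraryPostProcess_spec : Claim_equal_peaksAndTroughsArraryPostProcess := by
  intro arrary _
  unfold Spec_peaksAndTroughsArraryPostProcess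
  unfold peaksAndTroughsArraryPostProcess peaksAndTroughsArraryPostProcess_alt
  rw [pv_phase2_filter]
  rw [pv_main arrary arrary.length 0 0 false [] (by omega) le_rfl le_rfl
    (by rw [pvHasPeak_nil arrary 0 0 le_rfl])]
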